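-- pv_equiv track=rewrite | github.com/pypi-data/pypi-mirror-101 | packages/natf/natf-1.4.3-py3-none-any.whl/natf/utils.py | calc_ctr_flag_usnrc
-- ===== SOURCE A (Python) =====
-- def calc_ctr_flag_usnrc(rwc, rwcs):
--     """
--     Calculate the flat '>' or '<' for a specific radwaste class.
--     Supprted standard: 'USNRC' and 'USNRC_FETTER'.
--     Eg: rwc='LLWA', rwcs=['LLWC', 'LLWB'], flag is '>'.
--     Eg: rwc='ILW', rwcs=['LLWC', 'LLWB'], flag is '<'.
--     """
--     class_dict = {'LLWA': 0, 'LLWB': 1, 'LLWC': 2, 'ILW': 3}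
--     min_level = len(class_dict) - 1
--     max_level = 0
--     for i, item in enumerate(rwcs):
--         if min_level > class_dict[item]:
--             min_level = class_dict[item]
--         if max_level < class_dict[item]:
--             max_level = class_dict[item]
--
--     if class_dict[rwc] < min_level:
--         return '>'
--     else:
--         return '<'
-- ===== SOURCE B (Python) =====
-- def calc_ctr_flag_usnrc(rwc, rwcs):
--     """Walk the rungs of the class ladder from lowest to highest instead of
--     scanning rwcs for a minimum rank: collect the set of rungs occupied by
--     rwcs, then climb; the first rung that is occupied (or is the top rung)
--     decides '<', while reaching rwc's own rung first decides '>'."""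
--     class_dict = {'LLWA': 0, 'LLWB': 1, 'LLWC': 2, 'ILW': 3}
--     occupied = {class_dict[item] for item in rwcs}
--     target = class_dict[rwc]
--     for rung in range(len(class_dict)):
--         if rung in occupied or rung == len(class_dict) - 1:
--             return '<'
--         if rung == target:
--             return '>'
--     return '<'
-- ===== Notes on version B (the rewrite author's own statement) =====
-- stated objective: alternative
-- what changed: Instead of scanning rwcs tracking a running minimum rank and comparing against it, B builds the set of ladder rungs occupied by rwcs and then climbs the fixed 4-rung ladder, deciding at the first occupied (or top) rung whether rwc's own rung was passed first; no minimum or maximum is computed.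
import Mathlib
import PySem

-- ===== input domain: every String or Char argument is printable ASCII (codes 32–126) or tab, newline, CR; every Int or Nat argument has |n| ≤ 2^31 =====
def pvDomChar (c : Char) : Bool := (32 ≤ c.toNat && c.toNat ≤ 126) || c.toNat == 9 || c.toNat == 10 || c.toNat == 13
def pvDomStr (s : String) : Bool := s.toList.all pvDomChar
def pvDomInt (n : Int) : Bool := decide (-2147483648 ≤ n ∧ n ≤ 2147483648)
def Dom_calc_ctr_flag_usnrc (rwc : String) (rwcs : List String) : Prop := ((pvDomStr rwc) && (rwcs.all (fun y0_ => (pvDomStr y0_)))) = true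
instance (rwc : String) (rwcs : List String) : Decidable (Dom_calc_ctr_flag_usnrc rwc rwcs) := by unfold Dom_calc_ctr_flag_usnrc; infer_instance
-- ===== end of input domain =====

-- B replaces A's min-tracking scan of rwcs by a set of occupied ladder rungs plus a climb of
-- the fixed ladder that stops at the first occupied or top rung (objective: alternative). Equivalence is
-- claimed where every class code is known (otherwise Python A raises KeyError).

-- ===== PORT A =====
-- the literal dict {'LLWA': 0, 'LLWB': 1, 'LLWC': 2, 'ILW': 3}
def pvClassDict : PySem.Dict String Int :=
  ((((PySem.Dict.empty).insert "LLWA" 0).insert "LLWB" 1).insert "LLWC" 2).insert "ILW" 3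

-- A's loop over rwcs tracking (min_level, max_level); max_level is dead state but is kept,
-- as in the Python. Dict lookups use getD 0; Pre_ excludes the keys where Python raises.
def calc_ctr_flag_usnrc (rwc : String) (rwcs : List String) : String :=
  let st := rwcs.foldl (fun (p : Int × Int) item =>
      let v := pvClassDict.getD item 0
      let mn := if p.1 > v then v else p.1
      let mx := if p.2 < v then v else p.2
      (mn, mx)) (((pvClassDict.size : Int) - 1), 0)
  if pvClassDict.getD rwc 0 < st.1 then ">" else "<"

-- ===== PORT B =====
-- B's set comprehension {class_dict[item] for item in rwcs} is PySem.Set.ofList of the map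
-- (getD 0; Pre_ excludes the unknown keys where Python raises KeyError), and B's for-loop
-- over range(len(class_dict)) is the recursion pvWalkB over PySem.List.pyRange.
def pvWalkB (target top : Int) (occupied : PySem.Set Int) : List Int → String
  | [] => "<"
  | rung :: rest =>
    if PySem.Set.contains occupied rung || rung == top then "<"
    else if rung == target then ">"
    else pvWalkB target top occupied rest

def calc_ctr_flag_usnrc_alt (rwc : String) (rwcs : List String) : String :=
  let occupied : PySem.Set Int :=
    PySem.Set.ofList (rwcs.map (fun item => pvClassDict.getD item 0))
  let target := pvClassDict.getD rwc 0
  pvWalkB target ((pvClassDict.size : Int) - 1) occupied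
    (PySem.List.pyRange 0 (pvClassDict.size : Int) 1)

-- ===== PRECONDITION & SPEC =====
-- exactly the inputs on which Python A returns: every class code is a key of the dict
def Pre_calc_ctr_flag_usnrc (rwc : String) (rwcs : List String) : Prop :=
  rwc ∈ (["LLWA", "LLWB", "LLWC", "ILW"] : List String) ∧
    ∀ x ∈ rwcs, x ∈ (["LLWA", "LLWB", "LLWC", "ILW"] : List String)
instance (rwc : String) (rwcs : List String) : Decidable (Pre_calc_ctr_flag_usnrc rwc rwcs) := by unfold Pre_calc_ctr_flag_usnrc; infer_instance

def pvWitness_calc_ctr_flag_usnrc : String × List String := ("LLWA", ["LLWC", "LLWB"])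

def Spec_calc_ctr_flag_usnrc (rwc : String) (rwcs : List String) (out : String) : Prop := out = calc_ctr_flag_usnrc_alt rwc rwcs
instance (rwc : String) (rwcs : List String) (out : String) : Decidable (Spec_calc_ctr_flag_usnrc rwc rwcs out) := by unfold Spec_calc_ctr_flag_usnrc; infer_instance

-- ===== CLAIM (what is proved, stated in full; the proofs are below) =====
def Claim_equal_calc_ctr_flag_usnrc : Prop := ∀ (rwc : String) (rwcs : List String), Dom_calc_ctr_flag_usnrc rwc rwcs → Pre_calc_ctr_flag_usnrc rwc rwcs → Spec_calc_ctr_flag_usnrc rwc rwcs (calc_ctr_flag_usnrc rwc rwcs)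

-- ===== LEMMAS AND PROOFS =====

-- invariant of A's fold: being strictly below the running minimum after the loop
-- is being below the initial minimum and below every element's class
theorem pv_fold_min_iff (level : Int) (xs : List String) : ∀ (m M : Int),
    (level < (xs.foldl (fun (p : Int × Int) item =>
      let v := pvClassDict.getD item 0
      let mn := if p.1 > v then v else p.1
      let mx := if p.2 < v then v else p.2
      (mn, mx)) (m, M)).1)
    ↔ (level < m ∧ ∀ x ∈ xs, level < pvClassDict.getD x 0) := by
  induction xs with
  | nil => simp
  | cons x xs ih =>
    intro m M
    simp only [List.foldl_cons, ih, List.mem_cons]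
    constructor
    · rintro ⟨h1, h2⟩
      split_ifs at h1 with h
      · exact ⟨by omega, fun y hy => hy.elim (fun e => e ▸ h1) (h2 y)⟩
      · exact ⟨h1, fun y hy => hy.elim (fun e => by subst e; omega) (h2 y)⟩
    · rintro ⟨h1, h2⟩
      have hx := h2 x (Or.inl rfl)
      refine ⟨?_, fun y hy => h2 y (Or.inr hy)⟩
      split_ifs <;> omega

-- "every rwcs class is strictly above level" ↔ "no key of rank ≤ level occurs in rwcs"
theorem pv_forall_iff (L : Int) (rwcs : List String)
    (hs : ∀ x ∈ rwcs, x ∈ (["LLWA", "LLWB", "LLWC", "ILW"] : List String)) :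
    (∀ x ∈ rwcs, L < pvClassDict.getD x 0) ↔
      (∀ k ∈ (["LLWA", "LLWB", "LLWC", "ILW"] : List String),
        pvClassDict.getD k 0 ≤ L → k ∉ rwcs) := by
  constructor
  · intro h k _ hkL hkm
    exact absurd (h k hkm) (not_lt.2 hkL)
  · intro h x hx
    by_contra hnot
    push Not at hnot
    exact h x (hs x hx) hnot hx

-- which key of the dict has a given rank (used to turn rung-membership in B's occupied set
-- into list membership of the corresponding class code)
theorem pv_occ_iff (rwcs : List String)
    (hs : ∀ x ∈ rwcs, x ∈ (["LLWA", "LLWB", "LLWC", "ILW"] : List String))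
    (r : Int) (k : String)
    (hk : ∀ k' ∈ (["LLWA", "LLWB", "LLWC", "ILW"] : List String),
      (pvClassDict.getD k' 0 = r ↔ k' = k)) :
    (∃ x ∈ rwcs, pvClassDict.getD x 0 = r) ↔ k ∈ rwcs := by
  constructor
  · rintro ⟨x, hx, he⟩
    exact ((hk x (hs x hx)).1 he) ▸ hx
  · intro h
    exact ⟨k, h, (hk k (hs k h)).2 rfl⟩

-- ===== VERDICT (by name: the statement is the Claim_ definition above) =====
theorem calc_ctr_flag_usnrc_spec : Claim_equal_calc_ctr_flag_usnrc := by
  intro rwc rwcs _ hpre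
  obtain ⟨hr, hs⟩ := hpre
  unfold Spec_calc_ctr_flag_usnrc calc_ctr_flag_usnrc calc_ctr_flag_usnrc_alt
  have h0 := pv_occ_iff rwcs hs 0 "LLWA" (by decide)
  have h1 := pv_occ_iff rwcs hs 1 "LLWB" (by decide)
  have h2 := pv_occ_iff rwcs hs 2 "LLWC" (by decide)
  have e0 : pvClassDict.getD "LLWA" 0 = 0 := by decide
  have e1 : pvClassDict.getD "LLWB" 0 = 1 := by decide
  have e2 : pvClassDict.getD "LLWC" 0 = 2 := by decide
  have e3 : pvClassDict.getD "ILW" 0 = 3 := by decide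
  have esz : (pvClassDict.size : Int) = 4 := by decide
  have hR : PySem.List.pyRange 0 4 1 = [0, 1, 2, 3] := by decide
  simp only [pv_fold_min_iff, pv_forall_iff _ _ hs, esz, hR]
  fin_cases hr <;>
    simp [pvWalkB, PySem.Set.mem_ofList, e0, e1, e2, e3, h0, h1, h2] <;>
  · by_cases hA : "LLWA" ∈ rwcs <;>
      by_cases hB : "LLWB" ∈ rwcs <;>
      by_cases hC : "LLWC" ∈ rwcs <;>
        simp_all
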